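-- pv_equiv track=rewrite | github.com/josephabero/ItemRoutingSystem | app.py | collapse_directions
-- ===== SOURCE A (Python) =====
-- def collapse_directions(positions, skip_duplicate=True):
--     result = []
--     prev_x = prev_y = None
--     prev_dir = direction = None
--
--     for position in positions:
--         x, y = position
--
--         # Skip first position
--         if prev_x is None:
--             result.append(position)
--             prev_x, prev_y = position
--             continue
--
--         # Determine Direction
--         if prev_x != x:
--             if prev_x > x:
--                 direction = 'x+'
--             else:
--                 direction = 'x-'
--
--         elif prev_y != y:
--             if prev_y > y:
--                 direction = 'y+'
--             else:
--                 direction = 'y-'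
--
--         if skip_duplicate:
--             #  Skip second position
--             if prev_dir is None:
--                 prev_dir = direction
--                 prev_x, prev_y = position
--                 continue
--
--         # Evaluate if direction changed
--         if prev_dir != direction:
--             prev_dir = direction
--             result.append((prev_x, prev_y))
--
--         prev_x, prev_y = position
--
--     result.append(positions[-1])
--
--     return result
-- ===== SOURCE B (Python) =====
-- def collapse_directions(positions, skip_duplicate=True):
--     # Pass 1: a direction label for each consecutive pair; an unchanged
--     # position inherits the previous label (None while nothing has moved).
--     dirs = []
--     d = None
--     for (px, py), (x, y) in zip(positions, positions[1:]):
--         if px != x: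
--             d = 'x+' if px > x else 'x-'
--         elif py != y:
--             d = 'y+' if py > y else 'y-'
--         dirs.append(d)
--
--     result = [positions[0]]
--     pairs = list(zip(dirs, positions))
--     prev = None
--     if skip_duplicate:
--         # drop the leading run with no established direction, plus the
--         # edge that first establishes one (the "second position" skip)
--         while pairs and pairs[0][0] is None:
--             pairs.pop(0)
--         if pairs:
--             prev = pairs[0][0]
--             pairs.pop(0)
--     for d, p in pairs:
--         if d != prev:
--             prev = d
--             result.append(p)
--     result.append(positions[-1])
--     return result
-- ===== Notes on version B (the rewrite author's own statement) =====
-- stated objective: alternative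
-- what changed: Replaces A's fused single-pass state machine (prev point / prev_dir / direction juggled together) with a two-pass structure: first precompute a direction label per consecutive pair (unchanged positions inherit the previous label), then collapse that label list, handling skip_duplicate by dropping the leading unlabeled run plus the first labeled edge, and emitting a point wherever the label changes.
import Mathlib
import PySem

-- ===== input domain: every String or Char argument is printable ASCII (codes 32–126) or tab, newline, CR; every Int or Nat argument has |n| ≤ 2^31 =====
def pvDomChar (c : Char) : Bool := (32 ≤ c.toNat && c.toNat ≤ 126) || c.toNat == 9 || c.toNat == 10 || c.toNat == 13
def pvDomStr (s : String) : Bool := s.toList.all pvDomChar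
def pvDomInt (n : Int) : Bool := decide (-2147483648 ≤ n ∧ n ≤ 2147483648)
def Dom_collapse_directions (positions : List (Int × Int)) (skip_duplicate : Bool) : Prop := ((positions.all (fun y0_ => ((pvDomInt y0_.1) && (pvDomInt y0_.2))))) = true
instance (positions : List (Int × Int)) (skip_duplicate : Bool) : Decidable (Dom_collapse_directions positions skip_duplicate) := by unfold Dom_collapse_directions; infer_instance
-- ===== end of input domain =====

-- B replaces A's fused single-pass state machine by a two-pass algorithm (precompute
-- per-edge direction labels, then collapse the label list); same cost, equal return value.

-- ===== PORT A =====
-- state: (result, prev point?, prev_dir, direction) — labels 'x+','x-','y+','y-' as Strings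
def pvStepA (skip_duplicate : Bool)
    (st : List (Int × Int) × Option (Int × Int) × Option String × Option String)
    (pos : Int × Int) : List (Int × Int) × Option (Int × Int) × Option String × Option String :=
  match st with
  | (result, prev, prev_dir, direction) =>
    match prev with
    | none => (result ++ [pos], some pos, prev_dir, direction)
    | some q =>
      let direction :=
        if q.1 ≠ pos.1 then (if q.1 > pos.1 then some "x+" else some "x-")
        else if q.2 ≠ pos.2 then (if q.2 > pos.2 then some "y+" else some "y-")
        else direction
      if skip_duplicate = true ∧ prev_dir = none then
        (result, some pos, direction, direction)
      else if prev_dir ≠ direction then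
        (result ++ [q], some pos, direction, direction)
      else
        (result, some pos, prev_dir, direction)

def collapse_directions (positions : List (Int × Int)) (skip_duplicate : Bool) : List (Int × Int) :=
  let st := positions.foldl (pvStepA skip_duplicate) ([], none, none, none)
  -- positions[-1]: IndexError (none) exactly on the empty list, excluded by Pre_
  st.1 ++ [(PySem.List.pyGet? positions (-1)).getD (0, 0)]

-- ===== PORT B =====
-- pass 1: direction label of each consecutive pair, inheriting across duplicates
def pvDirs (d : Option String) : List ((Int × Int) × (Int × Int)) → List (Option String)
  | [] => []
  | (q, p) :: rest =>
    let d' := if q.1 ≠ p.1 then (if q.1 > p.1 then some "x+" else some "x-")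
              else if q.2 ≠ p.2 then (if q.2 > p.2 then some "y+" else some "y-")
              else d
    d' :: pvDirs d' rest

-- skip_duplicate: drop the leading None-labelled run and the first labelled edge
def pvSkip : List (Option String × (Int × Int)) → Option String × List (Option String × (Int × Int))
  | [] => (none, [])
  | (none, _) :: rest => pvSkip rest
  | (some d, _) :: rest => (some d, rest)

-- pass 2: emit the pair's left point wherever the label changes
def pvEmit (prev : Option String) : List (Option String × (Int × Int)) → List (Int × Int)
  | [] => []
  | (d, p) :: rest => if d ≠ prev then p :: pvEmit d rest else pvEmit prev rest

def collapse_directions_alt (positions : List (Int × Int)) (skip_duplicate : Bool) : List (Int × Int) :=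
  match positions with
  | [] => []   -- Python B raises IndexError here (positions[0]); excluded by Pre_
  | p0 :: tl =>
    let dirs := pvDirs none ((p0 :: tl).zip tl)
    let pr := if skip_duplicate then pvSkip (dirs.zip (p0 :: tl))
              else (none, dirs.zip (p0 :: tl))
    (p0 :: pvEmit pr.1 pr.2) ++ [(PySem.List.pyGet? (p0 :: tl) (-1)).getD (0, 0)]

-- ===== PRECONDITION & SPEC =====
-- Pre_ excludes only the empty list, on which both A and B raise IndexError (positions[-1] / positions[0]).
def Pre_collapse_directions (positions : List (Int × Int)) (skip_duplicate : Bool) : Prop :=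
  positions ≠ []
instance (positions : List (Int × Int)) (skip_duplicate : Bool) : Decidable (Pre_collapse_directions positions skip_duplicate) := by unfold Pre_collapse_directions; infer_instance

def pvWitness_collapse_directions : (List (Int × Int)) × Bool := ([(0, 0), (1, 0), (2, 0), (2, 1)], true)

def Spec_collapse_directions (positions : List (Int × Int)) (skip_duplicate : Bool) (out : List (Int × Int)) : Prop := out = collapse_directions_alt positions skip_duplicate
instance (positions : List (Int × Int)) (skip_duplicate : Bool) (out : List (Int × Int)) : Decidable (Spec_collapse_directions positions skip_duplicate out) := by unfold Spec_collapse_directions; infer_instance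

-- ===== CLAIM (what is proved, stated in full; the proofs are below) =====
def Claim_equal_collapse_directions : Prop := ∀ (positions : List (Int × Int)) (skip_duplicate : Bool), Dom_collapse_directions positions skip_duplicate → Pre_collapse_directions positions skip_duplicate → Spec_collapse_directions positions skip_duplicate (collapse_directions positions skip_duplicate)

-- ===== LEMMAS AND PROOFS =====

-- the direction update both programs perform on one consecutive pair
def pvDirUpd (q p : Int × Int) (d : Option String) : Option String :=
  if q.1 ≠ p.1 then (if q.1 > p.1 then some "x+" else some "x-")
  else if q.2 ≠ p.2 then (if q.2 > p.2 then some "y+" else some "y-")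
  else d

-- recursion-shaped view of A's loop after the first element
def pvLoopA (skip : Bool) (q : Int × Int) (pd d : Option String) : List (Int × Int) → List (Int × Int)
  | [] => []
  | p :: rest =>
    let d' := pvDirUpd q p d
    if skip = true ∧ pd = none then pvLoopA skip p d' d' rest
    else if pd ≠ d' then q :: pvLoopA skip p d' d' rest
    else pvLoopA skip p pd d' rest

-- B's (label, left point) pairs, recursion-shaped
def pvPairs (q : Int × Int) (d : Option String) : List (Int × Int) → List (Option String × (Int × Int))
  | [] => []
  | p :: rest => (pvDirUpd q p d, q) :: pvPairs p (pvDirUpd q p d) rest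

theorem pvStepA_some (skip : Bool) (res : List (Int × Int)) (q : Int × Int)
    (pd d : Option String) (p : Int × Int) :
    pvStepA skip (res, some q, pd, d) p =
      (let d' := pvDirUpd q p d;
       if skip = true ∧ pd = none then (res, some p, d', d')
       else if pd ≠ d' then (res ++ [q], some p, d', d')
       else (res, some p, pd, d')) := rfl

theorem pvFoldA_eq (skip : Bool) :
    ∀ (l : List (Int × Int)) (res : List (Int × Int)) (q : Int × Int) (pd d : Option String),
    (l.foldl (pvStepA skip) (res, some q, pd, d)).1 = res ++ pvLoopA skip q pd d l := by
  intro l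
  induction l with
  | nil => intro res q pd d; simp [pvLoopA]
  | cons p rest ih =>
    intro res q pd d
    rw [List.foldl_cons]
    simp only [pvStepA_some, pvLoopA]
    by_cases h1 : skip = true ∧ pd = none
    · rw [if_pos h1, if_pos h1, ih]
    · rw [if_neg h1, if_neg h1]
      by_cases h2 : pd ≠ pvDirUpd q p d
      · rw [if_pos h2, if_pos h2, ih]; simp
      · rw [if_neg h2, if_neg h2, ih]

theorem pvZip_eq :
    ∀ (l : List (Int × Int)) (q : Int × Int) (d : Option String),
    (pvDirs d ((q :: l).zip l)).zip (q :: l) = pvPairs q d l := by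
  intro l
  induction l with
  | nil => intro q d; simp [pvDirs, pvPairs]
  | cons p rest ih =>
    intro q d
    simp only [List.zip_cons_cons, pvDirs, pvPairs, pvDirUpd]
    exact congrArg _ (ih p _)

theorem pvEmit_eq :
    ∀ (l : List (Int × Int)) (q : Int × Int) (pd d : Option String),
    pvLoopA false q pd d l = pvEmit pd (pvPairs q d l) := by
  intro l
  induction l with
  | nil => intro q pd d; simp [pvLoopA, pvPairs, pvEmit]
  | cons p rest ih =>
    intro q pd d
    simp only [pvLoopA, pvPairs, pvEmit]
    rw [if_neg (by simp)]
    by_cases h : pd = pvDirUpd q p d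
    · rw [if_neg (by simp [h]), if_neg (by simp [h]), ih]
    · rw [if_pos h, if_pos (Ne.symm h), ih]

theorem pvDirUpd_ne_none (q p : Int × Int) (d : Option String) (hd : d ≠ none) :
    pvDirUpd q p d ≠ none := by
  unfold pvDirUpd; split_ifs <;> simp [hd]

theorem pvLoopA_skip_some :
    ∀ (l : List (Int × Int)) (q : Int × Int) (pd d : Option String),
    pd ≠ none → d ≠ none → pvLoopA true q pd d l = pvLoopA false q pd d l := by
  intro l
  induction l with
  | nil => intro q pd d _ _; simp [pvLoopA]
  | cons p rest ih =>
    intro q pd d hpd hd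
    have hd' := pvDirUpd_ne_none q p d hd
    simp only [pvLoopA]
    rw [if_neg (show ¬(True ∧ pd = none) by simp [hpd]),
        if_neg (show ¬(false = true ∧ pd = none) by simp)]
    by_cases h : pd ≠ pvDirUpd q p d
    · rw [if_pos h, if_pos h, ih p _ _ hd' hd']
    · rw [if_neg h, if_neg h, ih p _ _ hpd hd']

theorem pvLoopA_skip_none :
    ∀ (l : List (Int × Int)) (q : Int × Int),
    pvLoopA true q none none l = pvEmit (pvSkip (pvPairs q none l)).1 (pvSkip (pvPairs q none l)).2 := by
  intro l
  induction l with
  | nil => intro q; simp [pvLoopA, pvPairs, pvSkip, pvEmit]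
  | cons p rest ih =>
    intro q
    cases hd : pvDirUpd q p none with
    | none =>
      simp only [pvLoopA, pvPairs, hd, pvSkip]
      rw [if_pos (show True ∧ True from ⟨trivial, trivial⟩)]
      exact ih p
    | some s =>
      simp only [pvLoopA, pvPairs, hd, pvSkip]
      rw [if_pos (show True ∧ True from ⟨trivial, trivial⟩)]
      rw [pvLoopA_skip_some rest p (some s) (some s) (by simp) (by simp), pvEmit_eq]

-- ===== VERDICT (by name: the statement is the Claim_ definition above) =====
theorem collapse_directions_spec : Claim_equal_collapse_directions := by
  intro positions skip hdom hpre
  unfold Spec_collapse_directions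
  match positions with
  | [] => exact absurd rfl hpre
  | p0 :: tl =>
    unfold collapse_directions collapse_directions_alt
    simp only [List.foldl_cons]
    have h0 : pvStepA skip ([], none, none, none) p0 = ([p0], some p0, none, none) := by
      simp [pvStepA]
    rw [h0, pvFoldA_eq skip tl [p0] p0 none none]
    rw [pvZip_eq tl p0 none]
    cases skip with
    | false =>
      rw [if_neg (by simp)]
      rw [pvEmit_eq tl p0 none none]
      simp
    | true =>
      rw [if_pos rfl]
      rw [pvLoopA_skip_none tl p0]
      simp
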